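-- pv_equiv track=rewrite | github.com/bambamshivam/Codechef | Problems/inc.py | iss
-- ===== SOURCE A (Python) =====
-- import math
--
-- def iss(n):
-- 	s=0
-- 	if n==0 or n==1:
-- 		s=1
-- 	else:
-- 		di={}
-- 		while n%2==0:
-- 			if 2 in di:
-- 				di[2]+=1
-- 			else:
-- 				di[2]=1
-- 			n=n//2
-- 		for i in range(3,int(math.sqrt(n))+1,2):
-- 			while n%i==0:
-- 				n=n//i
-- 				if i in di:
-- 					di[i]+=1
-- 				else:
-- 					di[i]=1
-- 		if n>2:
-- 			if n in di:
-- 				di[n]+=1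
-- 			else:
-- 				di[n]=1
-- 		for ke in di:
-- 			if di[ke]==1:
-- 				s+=nl(ke)
-- 			else:
-- 				s+=(nl(ke)+nl(di[ke]))
-- 	return s
--
-- def nl(n):
-- 	c=0
-- 	while n>0:
-- 		n=n//10
-- 		c+=1
-- 	return c
-- ===== SOURCE B (Python) =====
-- def nl(n):
-- 	return 0 if n <= 0 else nl(n // 10) + 1
--
-- def _spf(m):
-- 	d = 2
-- 	while d * d <= m:
-- 		if m % d == 0:
-- 			return d
-- 		d += 1
-- 	return m
--
-- def _go(m):
-- 	if m <= 1:
-- 		return 0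
-- 	p = _spf(m)
-- 	e = 0
-- 	while m % p == 0:
-- 		m //= p
-- 		e += 1
-- 	return nl(p) + (nl(e) if e > 1 else 0) + _go(m)
--
-- def iss(n):
-- 	if n == 0 or n == 1:
-- 		return 1
-- 	return _go(n)
-- ===== Notes on version B (the rewrite author's own statement) =====
-- stated objective: alternative
-- what changed: Replaces A's dict-plus-two-loops trial division (strip 2s, iterate odd candidates up to a precomputed sqrt while filling a prime->exponent dict, then a second loop summing over the dict) by a recursive decomposition: repeatedly find the smallest prime factor with a fresh divisor scan, strip its full exponent, add its digit-length contribution immediately, and recurse on the cofactor; no dict, no precomputed sqrt bound, no odd-only range.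
import Mathlib
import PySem

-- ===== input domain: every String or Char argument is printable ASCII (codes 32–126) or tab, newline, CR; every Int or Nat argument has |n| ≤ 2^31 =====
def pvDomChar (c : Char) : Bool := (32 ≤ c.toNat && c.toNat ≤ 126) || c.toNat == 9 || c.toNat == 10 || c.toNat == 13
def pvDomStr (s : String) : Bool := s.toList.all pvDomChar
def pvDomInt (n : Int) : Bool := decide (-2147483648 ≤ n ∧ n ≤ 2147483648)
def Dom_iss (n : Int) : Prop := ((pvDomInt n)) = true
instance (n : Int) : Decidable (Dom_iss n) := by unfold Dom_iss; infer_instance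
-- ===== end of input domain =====

-- B replaces A's dict-filling trial division (strip 2s, odd loop to a precomputed sqrt,
-- then a second loop summing over the dict) by a recursion on the cofactor: find the
-- smallest prime factor by a fresh divisor scan, strip its exponent, add its contribution,
-- recurse; same value, no dict.

-- ===== PORT A =====

-- nl(n): count of decimal digits via repeated //10 (same helper in both Pythons)
def nl (n : Int) : Int :=
  if h : 0 < n then nl (PySem.Int.floordiv n 10) + 1 else 0
termination_by n.toNat
decreasing_by
  rw [PySem.Int.floordiv_eq_ediv_of_pos (by norm_num : (0:Int) < 10)]
  omega

-- A's 'while n%2==0' loop: update the dict, divide n.  fuel is a totality guard only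
def issTwoA : Nat → Int → PySem.Dict Int Int → Int × PySem.Dict Int Int
  | 0, n, di => (n, di)
  | f+1, n, di =>
    if PySem.Int.mod n 2 = 0 then
      issTwoA f (PySem.Int.floordiv n 2)
        (if di.contains 2 then di.insert 2 (di.getD 2 0 + 1) else di.insert 2 1)
    else (n, di)

-- A's inner 'while n%i==0' loop: divide n, update the dict.  fuel is a totality guard only
def issInnA : Nat → Int → Int → PySem.Dict Int Int → Int × PySem.Dict Int Int
  | 0, _, n, di => (n, di)
  | f+1, i, n, di =>
    if PySem.Int.mod n i = 0 then
      issInnA f i (PySem.Int.floordiv n i)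
        (if di.contains i then di.insert i (di.getD i 0 + 1) else di.insert i 1)
    else (n, di)

-- one step of A's 'for i in range(3, int(math.sqrt(n))+1, 2)' loop
def issStepA (p : Int × PySem.Dict Int Int) (i : Int) : Int × PySem.Dict Int Int :=
  issInnA p.1.toNat i p.1 p.2

-- A's trailing 'if n>2: di[n] += 1 / di[n] = 1'
def issLastA (p : Int × PySem.Dict Int Int) : PySem.Dict Int Int :=
  if 2 < p.1 then
    (if p.2.contains p.1 then p.2.insert p.1 (p.2.getD p.1 0 + 1) else p.2.insert p.1 1)
  else p.2

-- A's final 'for ke in di' summation loop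
def issSumA (d : PySem.Dict Int Int) : Int :=
  d.keys.foldl (fun s ke => s + (if d.getD ke 0 = 1 then nl ke else nl ke + nl (d.getD ke 0))) 0

def iss (n : Int) : Int :=
  if n = 0 ∨ n = 1 then 1
  else
    -- int(math.sqrt(m)) is ported as Nat.sqrt: exact for the |n| ≤ 2^31 domain
    issSumA (issLastA
      ((PySem.List.pyRange 3 (((issTwoA n.toNat n PySem.Dict.empty).1.toNat.sqrt : Int) + 1) 2).foldl
        issStepA (issTwoA n.toNat n PySem.Dict.empty)))

-- ===== PORT B =====

-- B's 'while m%p==0: m//=p; e+=1' exponent-stripping loop.  fuel is a totality guard only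
def issCnt : Nat → Int → Int → Int → Int × Int
  | 0, n, _, e => (n, e)
  | f+1, n, p, e =>
    if PySem.Int.mod n p = 0 then issCnt f (PySem.Int.floordiv n p) p (e + 1)
    else (n, e)

-- B's _spf(m): scan d = 2, 3, … while d*d ≤ m for the first divisor, else m itself.
-- fuel is a totality guard only
def spfGo : Nat → Int → Int → Int
  | 0, _, m => m
  | f+1, d, m =>
    if d * d ≤ m then (if PySem.Int.mod m d = 0 then d else spfGo f (d + 1) m) else m

def spf (m : Int) : Int := spfGo (m.toNat + 1) 2 m

-- B's _go(m): contribution of the smallest prime factor, then recurse on the cofactor.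
-- fuel is a totality guard only
def issGo : Nat → Int → Int
  | 0, _ => 0
  | f+1, m =>
    if m ≤ 1 then 0
    else
      nl (spf m) +
        (if 1 < (issCnt m.toNat m (spf m) 0).2 then nl (issCnt m.toNat m (spf m) 0).2 else 0) +
        issGo f (issCnt m.toNat m (spf m) 0).1

def iss_alt (n : Int) : Int :=
  if n = 0 ∨ n = 1 then 1 else issGo n.toNat n

-- ===== PRECONDITION & SPEC =====
-- A raises ValueError (math.sqrt of a negative) on every negative input, so Pre_ excludes exactly the negatives.
def Pre_iss (n : Int) : Prop := 0 ≤ n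
instance (n : Int) : Decidable (Pre_iss n) := by unfold Pre_iss; infer_instance
def pvWitness_iss : Int := (12)

def Spec_iss (n : Int) (out : Int) : Prop := out = iss_alt n
instance (n : Int) (out : Int) : Decidable (Spec_iss n out) := by unfold Spec_iss; infer_instance

-- ===== CLAIM (what is proved, stated in full; the proofs are below) =====
def Claim_equal_iss : Prop := ∀ (n : Int), Dom_iss n → Pre_iss n → Spec_iss n (iss n)

-- ===== LEMMAS AND PROOFS =====

-- streaming intermediate form used only by the proof: A's fold with the contribution
-- added inline instead of stored in the dict (bridge between A's dict and B's recursion)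
def issStepB (p : Int × Int) (i : Int) : Int × Int :=
  let w := issCnt p.1.toNat p.1 i 0
  (w.1, p.2 + (if w.2 ≠ 0 then nl i + (if 1 < w.2 then nl w.2 else 0) else 0))

def issStream (n : Int) : Int :=
  if n = 0 ∨ n = 1 then 1
  else
    let q := issCnt n.toNat n 2 0
    let s : Int := if q.2 ≠ 0 then nl 2 + (if 1 < q.2 then nl q.2 else 0) else 0
    let r := (PySem.List.pyRange 3 ((q.1.toNat.sqrt : Int) + 1) 2).foldl issStepB (q.1, s)
    r.2 + (if 2 < r.1 then nl r.1 else 0)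

-- contribution of one dict entry to A's final sum
def sumC (l : List (Int × Int)) : Int :=
  (l.map (fun p => if p.2 = 1 then nl p.1 else nl p.1 + nl p.2)).sum

theorem sumC_append (a b : List (Int × Int)) : sumC (a ++ b) = sumC a + sumC b := by
  simp [sumC]

theorem cnt_shift (p : Int) : ∀ (f : Nat) (n e : Int),
    issCnt f n p e = ((issCnt f n p 0).1, e + (issCnt f n p 0).2) := by
  intro f
  induction f with
  | zero => intro n e; simp [issCnt]
  | succ f ih =>
    intro n e
    simp only [issCnt]
    split_ifs with h
    · rw [ih _ (e+1), ih _ (0+1)]; simp; omega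
    · simp

theorem cnt_le (p : Int) : ∀ (f : Nat) (n e : Int), e ≤ (issCnt f n p e).2 := by
  intro f
  induction f with
  | zero => intro n e; simp [issCnt]
  | succ f ih =>
    intro n e
    simp only [issCnt]
    split_ifs with h
    · exact le_trans (by omega) (ih _ (e+1))
    · simp

theorem cnt_dvd (p : Int) : ∀ (f : Nat) (n e : Int), (issCnt f n p e).1 ∣ n := by
  intro f
  induction f with
  | zero => intro n e; simp [issCnt]
  | succ f ih =>
    intro n e
    simp only [issCnt]
    split_ifs with h
    · have hd : PySem.Int.floordiv n p ∣ n := by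
        have := PySem.Int.floordiv_mul_add_mod n p
        rw [h] at this
        exact Dvd.intro p (by linarith)
      exact dvd_trans (ih _ (e+1)) hd
    · simp

theorem cnt_pos (p : Int) (hp : 2 ≤ p) : ∀ (f : Nat) (n e : Int), 1 ≤ n → 1 ≤ (issCnt f n p e).1 := by
  intro f
  induction f with
  | zero => intro n e h; simpa [issCnt]
  | succ f ih =>
    intro n e h
    simp only [issCnt]
    split_ifs with hm
    · refine ih _ (e+1) ?_
      have heq := PySem.Int.floordiv_mul_add_mod n p
      rw [hm] at heq
      nlinarith [heq]
    · simpa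

theorem cnt_complete (p : Int) (hp : 2 ≤ p) : ∀ (f : Nat) (n e : Int), 1 ≤ n → n.toNat ≤ f →
    ¬ p ∣ (issCnt f n p e).1 := by
  intro f
  induction f with
  | zero => intro n e h hf; omega
  | succ f ih =>
    intro n e h hf
    simp only [issCnt]
    split_ifs with hm
    · have heq := PySem.Int.floordiv_mul_add_mod n p
      rw [hm] at heq
      have h1 : 1 ≤ PySem.Int.floordiv n p := by nlinarith
      have h2 : PySem.Int.floordiv n p < n := by nlinarith
      exact ih _ (e+1) h1 (by omega)
    · rw [← PySem.Int.mod_eq_zero_iff_dvd]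
      simpa [issCnt] using hm

theorem dict_insert_get? (d : PySem.Dict Int Int) (k c : Int)
    (hnd : d.keys.Nodup) (h : d.get? k = some c) : d.insert k c = d := by
  have hc : d.contains k = true := by
    rw [PySem.Dict.contains_eq_isSome_get?, h]; rfl
  apply PySem.Dict.ext
  rw [PySem.Dict.items_insert_of_contains _ _ hc]
  have hfix : ∀ x ∈ d.items, (fun p : Int × Int => if p.1 == k then (k, c) else p) x = x := by
    rintro ⟨a, b⟩ hx
    by_cases hxk : a = k
    · subst hxk
      have hb : d.get? a = some b := PySem.Dict.get?_of_mem_items _ hx hnd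
      rw [h] at hb
      simp [Option.some_inj.mp hb]
    · simp [hxk]
  calc d.items.map _ = d.items.map id := List.map_congr_left hfix
  _ = d.items := List.map_id _

theorem twoA_eq_innA : ∀ (f : Nat) (n : Int) (di : PySem.Dict Int Int),
    issTwoA f n di = issInnA f 2 n di := by
  intro f
  induction f with
  | zero => intro n di; rfl
  | succ f ih =>
    intro n di
    simp only [issTwoA, issInnA]
    split_ifs with h <;> simp [ih]

theorem innA_pos (i : Int) : ∀ (f : Nat) (n : Int) (di : PySem.Dict Int Int) (c : Int),
    di.keys.Nodup → di.get? i = some c →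
    issInnA f i n di = ((issCnt f n i 0).1, di.insert i (c + (issCnt f n i 0).2)) := by
  intro f
  induction f with
  | zero =>
    intro n di c hnd h
    simp only [issInnA, issCnt]
    rw [show c + 0 = c by ring, dict_insert_get? di i c hnd h]
  | succ f ih =>
    intro n di c hnd h
    have hc : di.contains i = true := by
      rw [PySem.Dict.contains_eq_isSome_get?, h]; rfl
    by_cases hm : PySem.Int.mod n i = 0
    · simp only [issInnA, issCnt, hm, hc, reduceIte]
      rw [PySem.Dict.getD_of_get?_eq_some _ _ h]
      rw [ih _ _ (c+1) (PySem.Dict.nodup_keys_insert _ _ _ hnd) (PySem.Dict.get?_insert_self _ _ _)]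
      rw [PySem.Dict.insert_insert_self]
      rw [cnt_shift i f _ (0+1)]
      refine Prod.ext rfl ?_
      simp only []
      congr 1
      ring
    · simp only [issInnA, issCnt, hm, reduceIte]
      rw [show c + 0 = c by ring, dict_insert_get? di i c hnd h]

theorem innA_spec (i : Int) (f : Nat) (n : Int) (di : PySem.Dict Int Int)
    (hnd : di.keys.Nodup) (hc : di.contains i = false) :
    issInnA f i n di =
      ((issCnt f n i 0).1,
       if (issCnt f n i 0).2 = 0 then di else di.insert i (issCnt f n i 0).2) := by
  cases f with
  | zero => simp [issInnA, issCnt]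
  | succ f =>
    by_cases hm : PySem.Int.mod n i = 0
    · simp only [issInnA, issCnt, hm, hc, reduceIte, Bool.false_eq_true, if_false]
      rw [innA_pos i f _ _ 1 (PySem.Dict.nodup_keys_insert _ _ _ hnd) (PySem.Dict.get?_insert_self _ _ _)]
      rw [PySem.Dict.insert_insert_self]
      rw [cnt_shift i f _ (0+1)]
      have hle := cnt_le i f (PySem.Int.floordiv n i) 0
      have h1 : (1:Int) + ((issCnt f (PySem.Int.floordiv n i) i 0).2) ≠ 0 := by omega
      refine Prod.ext rfl ?_
      simp only []
      rw [show (0:Int) + 1 + (issCnt f (PySem.Int.floordiv n i) i 0).2 = 1 + (issCnt f (PySem.Int.floordiv n i) i 0).2 by ring]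
      rw [if_neg h1]
    · simp [issInnA, issCnt, hm]

theorem contrib_eq (j e : Int) (he : 0 ≤ e) :
    (if e ≠ 0 then nl j + (if 1 < e then nl e else 0) else 0) =
    (if e = 0 then 0 else (if e = 1 then nl j else nl j + nl e)) := by
  by_cases h0 : e = 0
  · simp [h0]
  · by_cases h1 : e = 1
    · simp [h1]
    · simp [h0, h1, show (1:Int) < e by omega]

theorem fold_rel : ∀ (l : List Int) (n s : Int) (di : PySem.Dict Int Int),
    1 ≤ n → di.keys.Nodup → (∀ k ∈ di.keys, ¬ k ∣ n) →
    (∀ k ∈ di.keys, ∀ j ∈ l, k ≠ j) → l.Pairwise (· ≠ ·) → (∀ j ∈ l, 2 ≤ j) →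
    ∃ E : List (Int × Int),
      (l.foldl issStepA (n, di)).1 = (l.foldl issStepB (n, s)).1 ∧
      (l.foldl issStepA (n, di)).2.items = di.items ++ E ∧
      (l.foldl issStepB (n, s)).2 = s + sumC E ∧
      1 ≤ (l.foldl issStepB (n, s)).1 ∧
      (l.foldl issStepB (n, s)).1 ∣ n ∧
      (l.foldl issStepA (n, di)).2.keys.Nodup ∧
      (∀ k ∈ (l.foldl issStepA (n, di)).2.keys, ¬ k ∣ (l.foldl issStepB (n, s)).1) := by
  intro l
  induction l with
  | nil =>
    intro n s di h1 h2 h3 _ _ _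
    exact ⟨[], rfl, by simp, by simp [sumC], h1, dvd_refl n, h2, h3⟩
  | cons j l ih =>
    intro n s di h1 h2 h3 h4 h5 h6
    have hj2 : 2 ≤ j := h6 j (by simp)
    obtain ⟨hjl, h5'⟩ := List.pairwise_cons.mp h5
    have hcont : di.contains j = false := by
      by_contra hc
      have hmem : j ∈ di.keys := (PySem.Dict.contains_iff_mem_keys _ _).mp (by simpa using hc)
      exact h4 j hmem j (by simp) rfl
    have hstepA : issStepA (n, di) j =
        ((issCnt n.toNat n j 0).1,
         if (issCnt n.toNat n j 0).2 = 0 then di else di.insert j (issCnt n.toNat n j 0).2) :=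
      innA_spec j n.toNat n di h2 hcont
    have hstepB : issStepB (n, s) j =
        ((issCnt n.toNat n j 0).1,
         s + (if (issCnt n.toNat n j 0).2 = 0 then 0
              else (if (issCnt n.toNat n j 0).2 = 1 then nl j
                    else nl j + nl (issCnt n.toNat n j 0).2))) := by
      simp only [issStepB]
      rw [contrib_eq j _ (cnt_le j n.toNat n 0)]
    set n' := (issCnt n.toNat n j 0).1 with hn'
    set e := (issCnt n.toNat n j 0).2 with he
    have he0 : (0:Int) ≤ e := cnt_le j n.toNat n 0
    have hdvd' : n' ∣ n := cnt_dvd j n.toNat n 0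
    have hpos' : 1 ≤ n' := cnt_pos j hj2 n.toNat n 0 h1
    have hjnd : ¬ j ∣ n' := cnt_complete j hj2 n.toNat n 0 h1 le_rfl
    set D' : PySem.Dict Int Int := if e = 0 then di else di.insert j e with hD'
    set C : Int := if e = 0 then 0 else (if e = 1 then nl j else nl j + nl e) with hC
    have hD'items : D'.items = di.items ++ (if e = 0 then [] else [(j, e)]) := by
      by_cases h : e = 0
      · simp [hD', h]
      · simp only [hD', h, if_false]
        exact PySem.Dict.items_insert_of_not_contains di e hcont
    have hD'keys : ∀ k ∈ D'.keys, k ∈ di.keys ∨ k = j := by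
      intro k hk
      by_cases h : e = 0
      · rw [hD'] at hk; simp [h] at hk; exact Or.inl hk
      · rw [hD'] at hk
        simp only [h, if_false] at hk
        rw [PySem.Dict.keys_insert_of_not_contains di e hcont] at hk
        simpa using hk
    have hD'nd : D'.keys.Nodup := by
      by_cases h : e = 0
      · simpa [hD', h]
      · simp only [hD', h, if_false]
        exact PySem.Dict.nodup_keys_insert _ _ _ h2
    have hD'dvd : ∀ k ∈ D'.keys, ¬ k ∣ n' := by
      intro k hk
      rcases hD'keys k hk with hk' | rfl
      · exact fun hdd => h3 k hk' (dvd_trans hdd hdvd')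
      · exact hjnd
    have hD'fresh : ∀ k ∈ D'.keys, ∀ j' ∈ l, k ≠ j' := by
      intro k hk j' hj'
      rcases hD'keys k hk with hk' | rfl
      · exact h4 k hk' j' (by simp [hj'])
      · exact hjl j' hj'
    obtain ⟨E, i1, i2, i3, i4, i5, i6, i7⟩ :=
      ih n' (s + C) D' hpos' hD'nd hD'dvd hD'fresh h5' (fun j' hj' => h6 j' (by simp [hj']))
    simp only [List.foldl_cons]
    rw [hstepA, hstepB]
    refine ⟨(if e = 0 then [] else [(j, e)]) ++ E, i1, ?_, ?_, i4, dvd_trans i5 hdvd', i6, i7⟩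
    · rw [i2, hD'items, List.append_assoc]
    · rw [i3, sumC_append]
      have hCpre : C = sumC (if e = 0 then [] else [(j, e)]) := by
        by_cases h : e = 0 <;> simp [hC, sumC, h]
      rw [hCpre]
      ring

theorem sumA_eq_sumC (d : PySem.Dict Int Int) (hnd : d.keys.Nodup) :
    issSumA d = sumC d.items := by
  unfold issSumA
  rw [PySem.List.foldl_add]
  rw [PySem.Dict.items_eq_map_keys d hnd 0]
  simp only [sumC, List.map_map, zero_add]
  congr 1

theorem iss_eq_stream (n : Int) (h0 : 0 ≤ n) : iss n = issStream n := by
  by_cases hsm : n = 0 ∨ n = 1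
  · unfold iss issStream
    rw [if_pos hsm, if_pos hsm]
  · have h2 : 2 ≤ n := by
      rcases not_or.mp hsm with ⟨ha, hb⟩
      omega
    have h1n : (1:Int) ≤ n := by omega
    unfold iss issStream
    rw [if_neg hsm, if_neg hsm]
    rw [twoA_eq_innA,
      innA_spec 2 n.toNat n PySem.Dict.empty PySem.Dict.nodup_keys_empty (by simp)]
    dsimp only
    set N1 := (issCnt n.toNat n 2 0).1 with hN1
    set E2 := (issCnt n.toNat n 2 0).2 with hE2
    set D1 : PySem.Dict Int Int := if E2 = 0 then PySem.Dict.empty else PySem.Dict.empty.insert 2 E2 with hD1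
    set s1 : Int := if E2 ≠ 0 then nl 2 + (if 1 < E2 then nl E2 else 0) else 0 with hs1
    set l : List Int := PySem.List.pyRange 3 ((N1.toNat.sqrt : Int) + 1) 2 with hl
    have hE20 : (0:Int) ≤ E2 := cnt_le 2 n.toNat n 0
    have hN1pos : 1 ≤ N1 := cnt_pos 2 le_rfl n.toNat n 0 h1n
    have hN1nd2 : ¬ (2:Int) ∣ N1 := cnt_complete 2 le_rfl n.toNat n 0 h1n le_rfl
    have hD1keys : ∀ k ∈ D1.keys, k = 2 := by
      intro k hk
      by_cases h : E2 = 0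
      · rw [hD1] at hk; simp [h] at hk
      · rw [hD1] at hk
        simp only [h, if_false] at hk
        rw [PySem.Dict.keys_insert_of_not_contains _ _ (by simp)] at hk
        simpa using hk
    have hD1nd : D1.keys.Nodup := by
      by_cases h : E2 = 0
      · simp only [hD1, h, if_pos]
        exact PySem.Dict.nodup_keys_empty
      · simp only [hD1, h, if_false]
        exact PySem.Dict.nodup_keys_insert _ _ _ PySem.Dict.nodup_keys_empty
    have hD1items : D1.items = if E2 = 0 then [] else [(2, E2)] := by
      by_cases h : E2 = 0
      · simp [hD1, h]; rfl
      · simp only [hD1, h, if_false]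
        rw [PySem.Dict.items_insert_of_not_contains _ _ (by simp)]
        rfl
    have hl3 : ∀ j ∈ l, (3:Int) ≤ j := by
      intro j hj
      rw [hl, PySem.List.mem_pyRange_iff_of_pos (by norm_num)] at hj
      exact hj.1
    have hlnd : l.Pairwise (· ≠ ·) := by
      have : l.Nodup := by
        rw [hl, PySem.List.pyRange_of_pos _ _ (by norm_num : (0:Int) < 2)]
        exact List.Nodup.map (fun a b h => by omega) List.nodup_range
      exact this
    obtain ⟨E, f1, f2, f3, f4, f5, f6, f7⟩ :=
      fold_rel l N1 s1 D1 hN1pos hD1nd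
        (fun k hk => by rw [hD1keys k hk]; exact hN1nd2)
        (fun k hk j hj => by rw [hD1keys k hk]; have := hl3 j hj; omega)
        hlnd (fun j hj => by have := hl3 j hj; omega)
    have hs1C : s1 = sumC D1.items := by
      rw [hD1items, hs1, contrib_eq 2 E2 hE20]
      by_cases h : E2 = 0 <;> simp [sumC, h]
    set N := (l.foldl issStepB (N1, s1)).1 with hN
    by_cases h2N : 2 < N
    · have hNmem : (l.foldl issStepA (N1, D1)).2.contains N = false := by
        by_contra hc
        have : N ∈ (l.foldl issStepA (N1, D1)).2.keys :=
          (PySem.Dict.contains_iff_mem_keys _ _).mp (by simpa using hc)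
        exact f7 N this (dvd_refl N)
      have hlast : issLastA (l.foldl issStepA (N1, D1)) =
          (l.foldl issStepA (N1, D1)).2.insert N 1 := by
        unfold issLastA
        rw [f1, if_pos h2N, hNmem]
        simp
      rw [hlast, sumA_eq_sumC _ (PySem.Dict.nodup_keys_insert _ _ _ f6)]
      rw [PySem.Dict.items_insert_of_not_contains _ _ hNmem]
      rw [sumC_append, f2, sumC_append, f3, ← hs1C, if_pos h2N]
      simp [sumC]
      try ring
    · have hlast : issLastA (l.foldl issStepA (N1, D1)) = (l.foldl issStepA (N1, D1)).2 := by
        unfold issLastA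
        rw [f1, if_neg h2N]
      rw [hlast, sumA_eq_sumC _ f6, f2, sumC_append, f3, ← hs1C, if_neg h2N]
      ring

-- ===== bridge: the streaming form equals B's recursion =====

theorem pyRange2_nil (i B : Int) (h : B ≤ i) : PySem.List.pyRange i B 2 = [] := by
  rw [PySem.List.pyRange_of_pos _ _ (by norm_num : (0:Int) < 2)]
  simp [show ¬ (i < B) by omega]

theorem pyRange2_cons (i B : Int) (h : i < B) :
    PySem.List.pyRange i B 2 = i :: PySem.List.pyRange (i + 2) B 2 := by
  rw [PySem.List.pyRange_of_pos _ _ (by norm_num : (0:Int) < 2),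
      PySem.List.pyRange_of_pos _ _ (by norm_num : (0:Int) < 2)]
  rw [if_pos h]
  have hn : ((B - i + 2 - 1) / 2).toNat =
      (if i + 2 < B then ((B - (i + 2) + 2 - 1) / 2).toNat else 0) + 1 := by
    split_ifs with h2 <;> omega
  rw [hn, List.range_succ_eq_map]
  simp only [List.map_cons, List.map_map]
  congr 1
  · push_cast; ring
  · apply List.map_congr_left
    intro k _
    simp only [Function.comp]
    push_cast
    ring

theorem cnt_not_dvd (f : Nat) (m p : Int) (h : ¬ p ∣ m) : issCnt f m p 0 = (m, 0) := by
  cases f with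
  | zero => rfl
  | succ f =>
    simp only [issCnt]
    rw [if_neg (fun hc => h ((PySem.Int.mod_eq_zero_iff_dvd m p).mp hc))]

theorem cnt_exp_pos (p m : Int) (hd : p ∣ m) (hm : 1 ≤ m) : 1 ≤ (issCnt m.toNat m p 0).2 := by
  obtain ⟨f, hf⟩ : ∃ f, m.toNat = f + 1 := ⟨m.toNat - 1, by omega⟩
  rw [hf]
  simp only [issCnt]
  rw [if_pos ((PySem.Int.mod_eq_zero_iff_dvd m p).mpr hd)]
  exact le_trans (by omega) (cnt_le p f (PySem.Int.floordiv m p) (0 + 1))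

theorem cnt_lt (p m : Int) (hp : 2 ≤ p) (hd : p ∣ m) (hm : 1 ≤ m) :
    (issCnt m.toNat m p 0).1 < m := by
  obtain ⟨f, hf⟩ : ∃ f, m.toNat = f + 1 := ⟨m.toNat - 1, by omega⟩
  rw [hf]
  simp only [issCnt]
  rw [if_pos ((PySem.Int.mod_eq_zero_iff_dvd m p).mpr hd)]
  rw [cnt_shift]
  dsimp only
  have hq : PySem.Int.floordiv m p * p = m := by
    have h1 := PySem.Int.floordiv_mul_add_mod m p
    rw [(PySem.Int.mod_eq_zero_iff_dvd m p).mpr hd] at h1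
    linarith
  set q := PySem.Int.floordiv m p with hqd
  have hq1 : 1 ≤ q := by nlinarith
  have h1 : (issCnt f q p 0).1 ∣ q := cnt_dvd p f q 0
  have h2 : 1 ≤ (issCnt f q p 0).1 := cnt_pos p hp f q 0 hq1
  have h3 : (issCnt f q p 0).1 ≤ q := Int.le_of_dvd (by omega) h1
  nlinarith

theorem cnt_self (m : Int) (hm : 2 ≤ m) : issCnt m.toNat m m 0 = (1, 1) := by
  obtain ⟨f, hf⟩ : ∃ f, m.toNat = f + 2 := ⟨m.toNat - 2, by omega⟩
  rw [hf]
  simp only [issCnt]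
  rw [if_pos ((PySem.Int.mod_eq_zero_iff_dvd m m).mpr dvd_rfl)]
  have hdd : PySem.Int.floordiv m m = 1 := by
    rw [PySem.Int.floordiv_eq_ediv_of_pos (by omega)]
    exact Int.ediv_self (by omega)
  rw [hdd]
  rw [if_neg (by
    rw [PySem.Int.mod_eq_emod_of_pos (by omega : (0:Int) < m),
      Int.emod_eq_of_lt (by norm_num) (by omega)]
    norm_num)]
  norm_num

theorem spfGo_dvd2 (m : Int) (hm : 2 ≤ m) : ∀ (f : Nat) (d : Int), 2 ≤ d →
    spfGo f d m ∣ m ∧ 2 ≤ spfGo f d m := by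
  intro f
  induction f with
  | zero => intro d _; exact ⟨dvd_rfl, hm⟩
  | succ f ih =>
    intro d hd
    simp only [spfGo]
    split_ifs with h1 h2
    · exact ⟨(PySem.Int.mod_eq_zero_iff_dvd m d).mp h2, hd⟩
    · exact ih (d + 1) (by omega)
    · exact ⟨dvd_rfl, hm⟩

theorem spf_dvd2 (m : Int) (hm : 2 ≤ m) : spf m ∣ m ∧ 2 ≤ spf m :=
  spfGo_dvd2 m hm _ 2 le_rfl

theorem spfGo_eq (m i : Int) (hi2 : 2 ≤ i) (hd : i ∣ m) (hm : 2 ≤ m)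
    (hmin : ∀ d : Int, 2 ≤ d → d < i → ¬ d ∣ m) :
    ∀ (f : Nat) (d : Int), 2 ≤ d → d ≤ i → (i - d).toNat < f → spfGo f d m = i := by
  intro f
  induction f with
  | zero => intro d _ _ hf; omega
  | succ f ih =>
    intro d hd2 hdi hf
    simp only [spfGo]
    by_cases hdd : d * d ≤ m
    · rw [if_pos hdd]
      by_cases hmod : PySem.Int.mod m d = 0
      · rw [if_pos hmod]
        have hdm : d ∣ m := (PySem.Int.mod_eq_zero_iff_dvd m d).mp hmod
        rcases eq_or_lt_of_le hdi with h | h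
        · exact h
        · exact absurd hdm (hmin d hd2 h)
      · rw [if_neg hmod]
        have hdlt : d < i := by
          rcases eq_or_lt_of_le hdi with h | h
          · exact absurd ((PySem.Int.mod_eq_zero_iff_dvd m d).mpr (h ▸ hd)) hmod
          · exact h
        exact ih (d + 1) (by omega) (by omega) (by omega)
    · rw [if_neg hdd]
      push_neg at hdd
      obtain ⟨c, hc⟩ := hd
      have hc1 : 1 ≤ c := by nlinarith
      rcases eq_or_lt_of_le hc1 with h1 | h1
      · rw [hc, ← h1, mul_one]
      · have hdi2 : d * d ≤ i * i := by nlinarith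
        have hci : c < i := by nlinarith
        exact absurd ⟨i, by rw [hc]; ring⟩ (hmin c (by omega) hci)

theorem spf_eq (m i : Int) (hi2 : 2 ≤ i) (hd : i ∣ m) (hm : 2 ≤ m)
    (hmin : ∀ d : Int, 2 ≤ d → d < i → ¬ d ∣ m) : spf m = i := by
  have hi_le : i ≤ m := Int.le_of_dvd (by omega) hd
  exact spfGo_eq m i hi2 hd hm hmin (m.toNat + 1) 2 le_rfl hi2 (by omega)

theorem issGo_le_one (f : Nat) (m : Int) (h : m ≤ 1) : issGo f m = 0 := by
  cases f with
  | zero => rfl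
  | succ f => simp [issGo, h]

theorem issGo_fuel : ∀ (k : Nat) (m : Int) (f g : Nat), m.toNat ≤ k → m.toNat ≤ f →
    m.toNat ≤ g → issGo f m = issGo g m := by
  intro k
  induction k with
  | zero =>
    intro m f g h1 _ _
    rw [issGo_le_one f m (by omega), issGo_le_one g m (by omega)]
  | succ k ih =>
    intro m f g h1 hf hg
    by_cases hm : m ≤ 1
    · rw [issGo_le_one f m hm, issGo_le_one g m hm]
    · push_neg at hm
      obtain ⟨f', rfl⟩ : ∃ f', f = f' + 1 := ⟨f - 1, by omega⟩
      obtain ⟨g', rfl⟩ : ∃ g', g = g' + 1 := ⟨g - 1, by omega⟩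
      simp only [issGo, if_neg (by omega : ¬ m ≤ 1)]
      obtain ⟨hdvd, hp2⟩ := spf_dvd2 m (by omega)
      have hlt := cnt_lt (spf m) m hp2 hdvd (by omega)
      have hpos := cnt_pos (spf m) hp2 m.toNat m 0 (by omega)
      congr 1
      exact ih _ f' g' (by omega) (by omega) (by omega)

theorem issGo_step (m : Int) (hm : 2 ≤ m) :
    issGo m.toNat m =
      nl (spf m) +
        (if 1 < (issCnt m.toNat m (spf m) 0).2 then nl (issCnt m.toNat m (spf m) 0).2 else 0) +
        issGo (issCnt m.toNat m (spf m) 0).1.toNat (issCnt m.toNat m (spf m) 0).1 := by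
  obtain ⟨f, hf⟩ : ∃ f, m.toNat = f + 1 := ⟨m.toNat - 1, by omega⟩
  conv_lhs => rw [hf]
  simp only [issGo, if_neg (by omega : ¬ m ≤ 1)]
  congr 1
  obtain ⟨hdvd, hp2⟩ := spf_dvd2 m hm
  have hlt := cnt_lt (spf m) m hp2 hdvd (by omega)
  have hpos := cnt_pos (spf m) hp2 m.toNat m 0 (by omega)
  exact issGo_fuel (issCnt m.toNat m (spf m) 0).1.toNat _ f _ le_rfl (by omega) le_rfl

theorem key_base (i B m s : Int) (hBi : B ≤ i) (hB1 : 1 ≤ B) (hi3 : 3 ≤ i)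
    (hm : 1 ≤ m) (hB : m < B * B) (hmin : ∀ d : Int, 2 ≤ d → d < i → ¬ d ∣ m) :
    ((PySem.List.pyRange i B 2).foldl issStepB (m, s)).2 +
      (if 2 < ((PySem.List.pyRange i B 2).foldl issStepB (m, s)).1 then
        nl ((PySem.List.pyRange i B 2).foldl issStepB (m, s)).1 else 0)
    = s + issGo m.toNat m := by
  rw [pyRange2_nil i B hBi]
  simp only [List.foldl_nil]
  by_cases hm1 : m ≤ 1
  · rw [issGo_le_one _ m hm1, if_neg (by omega : ¬ (2:Int) < m)]
  · push_neg at hm1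
    have hm2 : 2 ≤ m := by omega
    have hm3 : 3 ≤ m := by
      by_contra h
      exact hmin 2 le_rfl (by omega) (by rw [show m = 2 by omega])
    have hmin' : ∀ d : Int, 2 ≤ d → d < m → ¬ d ∣ m := by
      intro d h2 hlt hd
      by_cases hdl : d < i
      · exact hmin d h2 hdl hd
      · push_neg at hdl
        obtain ⟨c, hc⟩ := hd
        have hc1 : 1 ≤ c := by nlinarith
        have hcne : c ≠ 1 := by
          intro h
          rw [h, mul_one] at hc
          omega
        have hdB : B ≤ d := by omega
        have hci : c < B := by nlinarith
        exact hmin c (by omega) (by omega) ⟨d, by rw [hc]; ring⟩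
    have hspf : spf m = m := spf_eq m m hm2 dvd_rfl hm2 hmin'
    rw [if_pos (by omega : (2:Int) < m)]
    rw [issGo_step m hm2, hspf, cnt_self m hm2]
    norm_num [issGo_le_one]

theorem key : ∀ (k : Nat) (i B m s : Int), (B - i).toNat ≤ k → i % 2 = 1 → 3 ≤ i →
    1 ≤ B → 1 ≤ m → m < B * B → (∀ d : Int, 2 ≤ d → d < i → ¬ d ∣ m) →
    ((PySem.List.pyRange i B 2).foldl issStepB (m, s)).2 +
      (if 2 < ((PySem.List.pyRange i B 2).foldl issStepB (m, s)).1 then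
        nl ((PySem.List.pyRange i B 2).foldl issStepB (m, s)).1 else 0)
    = s + issGo m.toNat m := by
  intro k
  induction k with
  | zero =>
    intro i B m s hk hodd hi3 hB1 hm hB hmin
    exact key_base i B m s (by omega) hB1 hi3 hm hB hmin
  | succ k ih =>
    intro i B m s hk hodd hi3 hB1 hm hB hmin
    by_cases hiB : i < B
    · rw [pyRange2_cons i B hiB]
      simp only [List.foldl_cons]
      by_cases hdvd : i ∣ m
      · have hm2 : 2 ≤ m := by
          have := Int.le_of_dvd (by omega) hdvd
          omega
        have he1 : 1 ≤ (issCnt m.toNat m i 0).2 := cnt_exp_pos i m hdvd (by omega)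
        have hw1pos : 1 ≤ (issCnt m.toNat m i 0).1 := cnt_pos i (by omega) m.toNat m 0 (by omega)
        have hw1dvd : (issCnt m.toNat m i 0).1 ∣ m := cnt_dvd i m.toNat m 0
        have hw1lt : (issCnt m.toNat m i 0).1 < m := cnt_lt i m (by omega) hdvd (by omega)
        have hnotI : ¬ i ∣ (issCnt m.toNat m i 0).1 :=
          cnt_complete i (by omega) m.toNat m 0 (by omega) le_rfl
        have hmin' : ∀ d : Int, 2 ≤ d → d < i + 2 → ¬ d ∣ (issCnt m.toNat m i 0).1 := by
          intro d h2 hlt hd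
          by_cases hdl : d < i
          · exact hmin d h2 hdl (hd.trans hw1dvd)
          · by_cases hdi : d = i
            · exact hnotI (hdi ▸ hd)
            · have h2d : (2:Int) ∣ d := by omega
              exact hmin 2 le_rfl (by omega) ((h2d.trans hd).trans hw1dvd)
        have hstep : issStepB (m, s) i =
            ((issCnt m.toNat m i 0).1,
             s + (nl i + (if 1 < (issCnt m.toNat m i 0).2 then nl (issCnt m.toNat m i 0).2 else 0))) := by
          simp only [issStepB]
          rw [if_pos (by omega : (issCnt m.toNat m i 0).2 ≠ 0)]
        rw [hstep]
        rw [ih (i + 2) B _ _ (by omega) (by omega) (by omega) hB1 hw1pos (by omega) hmin']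
        rw [issGo_step m hm2, spf_eq m i (by omega) hdvd hm2 hmin]
        ring
      · have hw : issCnt m.toNat m i 0 = (m, 0) := cnt_not_dvd m.toNat m i hdvd
        have hstep : issStepB (m, s) i = (m, s) := by
          simp [issStepB, hw]
        rw [hstep]
        apply ih (i + 2) B m s (by omega) (by omega) (by omega) hB1 hm hB
        intro d h2 hlt hd
        by_cases hdl : d < i
        · exact hmin d h2 hdl hd
        · by_cases hdi : d = i
          · exact hdvd (hdi ▸ hd)
          · have h2d : (2:Int) ∣ d := by omega
            exact hmin 2 le_rfl (by omega) (h2d.trans hd)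
    · exact key_base i B m s (by omega) hB1 hi3 hm hB hmin

theorem stream_eq_alt (n : Int) (h0 : 0 ≤ n) : issStream n = iss_alt n := by
  by_cases hsm : n = 0 ∨ n = 1
  · unfold issStream iss_alt
    rw [if_pos hsm, if_pos hsm]
  · have h2 : 2 ≤ n := by
      rcases not_or.mp hsm with ⟨ha, hb⟩
      omega
    unfold issStream iss_alt
    rw [if_neg hsm, if_neg hsm]
    dsimp only
    set N1 := (issCnt n.toNat n 2 0).1 with hN1
    set E2 := (issCnt n.toNat n 2 0).2 with hE2
    set s1 : Int := if E2 ≠ 0 then nl 2 + (if 1 < E2 then nl E2 else 0) else 0 with hs1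
    have hN1pos : 1 ≤ N1 := cnt_pos 2 le_rfl n.toNat n 0 (by omega)
    have hN1nd2 : ¬ (2:Int) ∣ N1 := cnt_complete 2 le_rfl n.toNat n 0 (by omega) le_rfl
    have hN1le : N1 ≤ n := Int.le_of_dvd (by omega) (cnt_dvd 2 n.toNat n 0)
    have hsq : N1 < ((N1.toNat.sqrt : Int) + 1) * ((N1.toNat.sqrt : Int) + 1) := by
      have h := Nat.lt_succ_sqrt N1.toNat
      zify [Nat.succ_eq_add_one] at h
      omega
    have hkey := key ((((N1.toNat.sqrt : Int) + 1) - 3).toNat) 3 ((N1.toNat.sqrt : Int) + 1)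
      N1 s1 le_rfl (by norm_num) le_rfl (by omega) hN1pos hsq
      (fun d hd2 hd3 hdd => hN1nd2 ((show d = 2 by omega) ▸ hdd))
    rw [hkey]
    -- remains: s1 + issGo N1.toNat N1 = issGo n.toNat n
    by_cases hdvd : (2:Int) ∣ n
    · have he1 : 1 ≤ E2 := cnt_exp_pos 2 n hdvd (by omega)
      have hw1lt : N1 < n := cnt_lt 2 n le_rfl hdvd (by omega)
      rw [issGo_step n h2, spf_eq n 2 le_rfl hdvd h2 (fun d hd2 hd3 => absurd hd2 (by omega))]
      rw [← hN1, ← hE2, hs1]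
      rw [if_pos (by omega : E2 ≠ 0)]
    · have hw : issCnt n.toNat n 2 0 = (n, 0) := cnt_not_dvd n.toNat n 2 hdvd
      have hN1n : N1 = n := by rw [hN1, hw]
      have hE20 : E2 = 0 := by rw [hE2, hw]
      rw [hs1, hE20, hN1n]
      simp

-- ===== VERDICT (by name: the statement is the Claim_ definition above) =====
theorem iss_spec : Claim_equal_iss := by
  intro n _ hpre
  exact (iss_eq_stream n hpre).trans (stream_eq_alt n hpre)
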